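-- pv_equiv track=rewrite | github.com/CoopEdu2022-Python/Gary | Exam/Exam10/1.py | uncommon
-- ===== SOURCE A (Python) =====
-- def uncommon(a, b):
--     n = 0
--     if a == b:
--         return -1
--     if len(a) < len(b):
--
--         for i in a:
--             if a not in b:
--                 n += 1
--
--     return n
-- ===== SOURCE B (Python) =====
-- def uncommon(a, b):
--     # Closed form: `a not in b` compares a list against ints and is always True,
--     # so A's loop either adds len(a) (when len(a) < len(b)) or nothing.
--     if a == b:
--         return -1
--     return len(a) if len(a) < len(b) else 0
-- ===== Notes on version B (the rewrite author's own statement) =====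
-- stated objective: simpler
-- what changed: Replaces the per-element loop (whose `a not in b` test is invariantly true, since a list never equals an int) with a direct closed-form three-way expression: -1, len(a), or 0.
import Mathlib
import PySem

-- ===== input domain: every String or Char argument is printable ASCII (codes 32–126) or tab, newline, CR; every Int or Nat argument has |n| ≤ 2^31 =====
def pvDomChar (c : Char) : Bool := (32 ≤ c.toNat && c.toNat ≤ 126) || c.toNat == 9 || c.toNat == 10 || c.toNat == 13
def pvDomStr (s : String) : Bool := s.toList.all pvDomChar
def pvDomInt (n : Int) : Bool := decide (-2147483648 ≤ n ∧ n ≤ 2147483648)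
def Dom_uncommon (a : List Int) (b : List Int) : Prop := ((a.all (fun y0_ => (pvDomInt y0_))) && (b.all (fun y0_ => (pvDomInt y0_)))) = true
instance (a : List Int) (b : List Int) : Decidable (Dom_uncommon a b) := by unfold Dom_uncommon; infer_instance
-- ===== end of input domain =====

-- ===== PORT A =====
-- `a not in b` in A compares a list against the int elements of b, so it is always True;
-- ported literally as a membership test that is False for every element.
def uncommon (a : List Int) (b : List Int) : Int :=
  let n : Int := 0
  if a = b then -1
  else if a.length < b.length then
    a.foldl (fun n _i => if ¬ (b.any (fun _x => decide False)) then n + 1 else n) n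
  else n

-- ===== PORT B =====
def uncommon_alt (a : List Int) (b : List Int) : Int :=
  if a = b then -1
  else if a.length < b.length then (a.length : Int) else 0

-- ===== PRECONDITION & SPEC =====
def Spec_uncommon (a : List Int) (b : List Int) (out : Int) : Prop := out = uncommon_alt a b
instance (a : List Int) (b : List Int) (out : Int) : Decidable (Spec_uncommon a b out) := by unfold Spec_uncommon; infer_instance

-- ===== CLAIM (what is proved, stated in full; the proofs are below) =====
def Claim_equal_uncommon : Prop := ∀ (a : List Int) (b : List Int), Dom_uncommon a b → Spec_uncommon a b (uncommon a b)

-- ===== LEMMAS AND PROOFS =====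

-- ===== VERDICT (by name: the statement is the Claim_ definition above) =====
theorem foldl_count (a : List Int) (n : Int) :
    a.foldl (fun n (_i : Int) => n + 1) n = n + a.length := by
  induction a generalizing n with
  | nil => simp
  | cons x xs ih => simp [List.foldl, ih]; omega

theorem uncommon_spec : Claim_equal_uncommon := by
  intro a b _
  unfold Spec_uncommon uncommon uncommon_alt
  have hb : (b.any (fun _x : Int => decide False)) = false := by simp
  simp only [hb, Bool.false_eq_true, not_false_eq_true, if_true]
  split_ifs with h1 h2 <;> simp [foldl_count]
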